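-- pv_equiv track=rewrite | github.com/Rayality/python_practice | problems/a_hard_set.py | calculate_plays
-- ===== SOURCE A (Python) =====
-- def calculate_plays(num_quarters):
--     num_plays_m1 = 0
--     num_plays_m2 = 0
--     num_plays_m3 = 0
--     total_plays = 0
--     kens_quarters = num_quarters
--     while kens_quarters:
--         # play the first machine
--         # using the loop condition as the quarter check
--         kens_quarters -= 1
--         num_plays_m1 += 1
--         total_plays += 1
--         # payout on the 27th play and reset the count
--         if num_plays_m1 == 27:
--             num_plays_m1 = 0
--             kens_quarters += 20
--         # quarter check 2nd machine (Zero will return a false)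
--         if kens_quarters:
--             kens_quarters -= 1
--             num_plays_m2 += 1
--             total_plays += 1
--             # payout on the 100th play and reset the count
--             if num_plays_m2 == 100:
--                 num_plays_m2 = 0
--                 kens_quarters += 50
--         # quarter check 3rd machine (Zero will return a false)
--         if kens_quarters:
--             kens_quarters -= 1
--             num_plays_m3 += 1
--             total_plays += 1
--             # payout on the 8th play and reset the count
--             if num_plays_m3 == 8:
--                 num_plays_m3 = 0
--                 kens_quarters += 7
--     return total_plays
-- ===== SOURCE B (Python) =====
-- def calculate_plays(num_quarters):
--     # The machine counters all reset every 5400 full rounds (16200 plays),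
--     # which costs exactly 16200 - (200*20 + 54*50 + 675*7) = 4775 quarters,
--     # so whole periods can be skipped arithmetically.
--     q = num_quarters
--     total = 0
--     if q >= 16200:
--         periods = (q - 16200) // 4775 + 1
--         total += 16200 * periods
--         q -= 4775 * periods
--     # finish the tail play-by-play, rotating through the three machines
--     c1 = c2 = c3 = 0
--     m = 0
--     while q:
--         q -= 1
--         total += 1
--         if m == 0:
--             c1 += 1
--             if c1 == 27:
--                 c1 = 0
--                 q += 20
--             m = 1
--         elif m == 1:
--             c2 += 1
--             if c2 == 100:
--                 c2 = 0
--                 q += 50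
--             m = 2
--         else:
--             c3 += 1
--             if c3 == 8:
--                 c3 = 0
--                 q += 7
--             m = 0
--     return total
-- ===== Notes on version B (the rewrite author's own statement) =====
-- stated objective: faster
-- what changed: B jumps all full 5400-round periods (16200 plays costing exactly 4775 quarters, after which every machine counter is back at 0) in one divmod computation, then simulates only the bounded sub-period tail with a single round-robin machine-index loop instead of A's three-block loop body.
import Mathlib
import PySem

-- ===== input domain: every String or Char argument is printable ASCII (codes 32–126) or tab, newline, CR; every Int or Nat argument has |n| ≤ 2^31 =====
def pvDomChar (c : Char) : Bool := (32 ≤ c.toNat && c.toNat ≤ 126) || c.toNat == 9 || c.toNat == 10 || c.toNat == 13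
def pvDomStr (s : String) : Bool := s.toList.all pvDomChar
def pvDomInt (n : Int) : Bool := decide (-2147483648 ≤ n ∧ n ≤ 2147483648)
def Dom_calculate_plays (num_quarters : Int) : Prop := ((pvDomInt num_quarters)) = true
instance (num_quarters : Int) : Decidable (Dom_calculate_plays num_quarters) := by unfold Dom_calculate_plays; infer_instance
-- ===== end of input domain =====

-- B replaces A's play-by-play simulation by one arithmetic jump over all full 5400-round
-- periods plus a bounded round-robin tail simulation (objective: faster).

-- ===== PORT A =====
-- A's while loop, transliterated over Nat (exact for num_quarters ≥ 0; for negative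
-- num_quarters Python A's loop never returns, so no value is constrained there).
-- The extra fuel argument is only a totality guard: 26*q + 1 fuel always suffices,
-- since 26*q + 20*m1 + 13*m2 + 23*m3 strictly decreases each iteration (proved below).
-- Each branch mirrors A's body: machine 1 plays unconditionally, machines 2 and 3
-- play only if quarters remain; payouts at counters 27/100/8.
def loopA (fuel : Nat) (q m1 m2 m3 t : Nat) : Nat :=
  match fuel with
  | 0 => t
  | fuel + 1 =>
    if q = 0 then t
    else
      -- machine 1
      let q1  := if m1 + 1 = 27 then (q - 1) + 20 else q - 1
      let m1' := if m1 + 1 = 27 then 0 else m1 + 1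
      let t1  := t + 1
      -- machine 2 (guarded by remaining quarters)
      let q2  := if q1 = 0 then q1 else if m2 + 1 = 100 then (q1 - 1) + 50 else q1 - 1
      let m2' := if q1 = 0 then m2 else if m2 + 1 = 100 then 0 else m2 + 1
      let t2  := if q1 = 0 then t1 else t1 + 1
      -- machine 3 (guarded by remaining quarters)
      let q3  := if q2 = 0 then q2 else if m3 + 1 = 8 then (q2 - 1) + 7 else q2 - 1
      let m3' := if q2 = 0 then m3 else if m3 + 1 = 8 then 0 else m3 + 1
      let t3  := if q2 = 0 then t2 else t2 + 1
      loopA fuel q3 m1' m2' m3' t3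

def calculate_plays (num_quarters : Int) : Int :=
  Int.ofNat (loopA (26 * num_quarters.toNat + 1) num_quarters.toNat 0 0 0 0)

-- ===== PORT B =====
-- B's tail loop: one play per iteration, rotating the machine index m.
-- Fuel is again only a totality guard (same strictly decreasing measure).
def loopB (fuel : Nat) (q c1 c2 c3 m t : Nat) : Nat :=
  match fuel with
  | 0 => t
  | fuel + 1 =>
    if q = 0 then t
    else
      if m = 0 then
        (if c1 + 1 = 27 then loopB fuel ((q - 1) + 20) 0 c2 c3 1 (t + 1)
         else loopB fuel (q - 1) (c1 + 1) c2 c3 1 (t + 1))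
      else if m = 1 then
        (if c2 + 1 = 100 then loopB fuel ((q - 1) + 50) c1 0 c3 2 (t + 1)
         else loopB fuel (q - 1) c1 (c2 + 1) c3 2 (t + 1))
      else
        (if c3 + 1 = 8 then loopB fuel ((q - 1) + 7) c1 c2 0 0 (t + 1)
         else loopB fuel (q - 1) c1 c2 (c3 + 1) 0 (t + 1))

def calculate_plays_alt (num_quarters : Int) : Int :=
  let q0 := num_quarters.toNat   -- exact for num_quarters ≥ 0 (Python B never returns on negatives)
  let periods := if 16200 ≤ q0 then (q0 - 16200) / 4775 + 1 else 0
  let q1 := q0 - 4775 * periods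
  Int.ofNat (loopB (26 * q1 + 1) q1 0 0 0 0 (16200 * periods))

-- ===== PRECONDITION & SPEC =====
def Spec_calculate_plays (num_quarters : Int) (out : Int) : Prop := out = calculate_plays_alt num_quarters
instance (num_quarters : Int) (out : Int) : Decidable (Spec_calculate_plays num_quarters out) := by unfold Spec_calculate_plays; infer_instance

-- ===== CLAIM (what is proved, stated in full; the proofs are below) =====
def Claim_equal_calculate_plays : Prop := ∀ (num_quarters : Int), Dom_calculate_plays num_quarters → Spec_calculate_plays num_quarters (calculate_plays num_quarters)

-- ===== LEMMAS AND PROOFS =====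

-- the measure that strictly decreases at every play of either loop
def measQ (q c1 c2 c3 : Nat) : Nat := 26 * q + 20 * c1 + 13 * c2 + 23 * c3

-- both loops with exactly enough fuel
def runA (q m1 m2 m3 t : Nat) : Nat := loopA (measQ q m1 m2 m3 + 1) q m1 m2 m3 t
def runB (q c1 c2 c3 m t : Nat) : Nat := loopB (measQ q c1 c2 c3 + 1) q c1 c2 c3 m t

lemma loopA_succ (f q m1 m2 m3 t : Nat) :
    loopA (f + 1) q m1 m2 m3 t =
      if q = 0 then t
      else
        let q1  := if m1 + 1 = 27 then (q - 1) + 20 else q - 1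
        let m1' := if m1 + 1 = 27 then 0 else m1 + 1
        let t1  := t + 1
        let q2  := if q1 = 0 then q1 else if m2 + 1 = 100 then (q1 - 1) + 50 else q1 - 1
        let m2' := if q1 = 0 then m2 else if m2 + 1 = 100 then 0 else m2 + 1
        let t2  := if q1 = 0 then t1 else t1 + 1
        let q3  := if q2 = 0 then q2 else if m3 + 1 = 8 then (q2 - 1) + 7 else q2 - 1
        let m3' := if q2 = 0 then m3 else if m3 + 1 = 8 then 0 else m3 + 1
        let t3  := if q2 = 0 then t2 else t2 + 1
        loopA f q3 m1' m2' m3' t3 := rfl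

-- the measure strictly decreases across one iteration of A's body
lemma measQ_decA (q m1 m2 m3 : Nat) (hq : ¬ q = 0) :
    (let q1  := if m1 + 1 = 27 then (q - 1) + 20 else q - 1
     let q2  := if q1 = 0 then q1 else if m2 + 1 = 100 then (q1 - 1) + 50 else q1 - 1
     measQ (if q2 = 0 then q2 else if m3 + 1 = 8 then (q2 - 1) + 7 else q2 - 1)
           (if m1 + 1 = 27 then 0 else m1 + 1)
           (if q1 = 0 then m2 else if m2 + 1 = 100 then 0 else m2 + 1)
           (if q2 = 0 then m3 else if m3 + 1 = 8 then 0 else m3 + 1)) <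
      measQ q m1 m2 m3 := by
  simp only [measQ]
  split_ifs <;> omega

-- any sufficient fuel computes the same value
lemma loopA_irrel (f : Nat) : ∀ f' q m1 m2 m3 t, measQ q m1 m2 m3 < f → measQ q m1 m2 m3 < f' →
    loopA f q m1 m2 m3 t = loopA f' q m1 m2 m3 t := by
  induction f with
  | zero => intro f' q m1 m2 m3 t h _; exact absurd h (Nat.not_lt_zero _)
  | succ f ih =>
    intro f' q m1 m2 m3 t h h'
    match f' with
    | 0 => exact absurd h' (Nat.not_lt_zero _)
    | f' + 1 =>
      rw [loopA_succ, loopA_succ]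
      by_cases hq : q = 0
      · rw [if_pos hq, if_pos hq]
      · rw [if_neg hq, if_neg hq]
        simp only []
        exact ih _ _ _ _ _ _ (by have := measQ_decA q m1 m2 m3 hq; simp only [] at this; omega)
                            (by have := measQ_decA q m1 m2 m3 hq; simp only [] at this; omega)

lemma runA_exit (m1 m2 m3 t : Nat) : runA 0 m1 m2 m3 t = t := rfl

lemma runA_step (q m1 m2 m3 t : Nat) (hq : ¬ q = 0) :
    runA q m1 m2 m3 t =
      (let q1  := if m1 + 1 = 27 then (q - 1) + 20 else q - 1
       let q2  := if q1 = 0 then q1 else if m2 + 1 = 100 then (q1 - 1) + 50 else q1 - 1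
       let t1  := t + 1
       let t2  := if q1 = 0 then t1 else t1 + 1
       runA (if q2 = 0 then q2 else if m3 + 1 = 8 then (q2 - 1) + 7 else q2 - 1)
            (if m1 + 1 = 27 then 0 else m1 + 1)
            (if q1 = 0 then m2 else if m2 + 1 = 100 then 0 else m2 + 1)
            (if q2 = 0 then m3 else if m3 + 1 = 8 then 0 else m3 + 1)
            (if q2 = 0 then t2 else t2 + 1)) := by
  simp only [runA]
  rw [loopA_succ, if_neg hq]
  simp only []
  exact loopA_irrel _ _ _ _ _ _ _ (by have := measQ_decA q m1 m2 m3 hq; simp only [] at this; omega)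
                                  (Nat.lt_succ_self _)

-- one full round of A's body on the pure counter state: (payout, c1', c2', c3')
def roundF (c1 c2 c3 : Nat) : Nat × Nat × Nat × Nat :=
  ((if c1 + 1 = 27 then 20 else 0) + (if c2 + 1 = 100 then 50 else 0) + (if c3 + 1 = 8 then 7 else 0),
   (if c1 + 1 = 27 then 0 else c1 + 1),
   (if c2 + 1 = 100 then 0 else c2 + 1),
   (if c3 + 1 = 8 then 0 else c3 + 1))

-- k rounds iterated: (total payout, final counters)
def iterRounds : Nat → Nat → Nat → Nat → Nat × Nat × Nat × Nat
  | 0, c1, c2, c3 => (0, c1, c2, c3)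
  | k + 1, c1, c2, c3 =>
      let r := roundF c1 c2 c3
      let s := iterRounds k r.2.1 r.2.2.1 r.2.2.2
      (r.1 + s.1, s.2)

-- with at least 3 quarters, one iteration of A's loop is one full round
lemma loopA_round (q c1 c2 c3 t : Nat) (h : 3 ≤ q) :
    runA q c1 c2 c3 t =
      runA ((q - 3) + (roundF c1 c2 c3).1) (roundF c1 c2 c3).2.1 (roundF c1 c2 c3).2.2.1
           (roundF c1 c2 c3).2.2.2 (t + 3) := by
  rw [runA_step q c1 c2 c3 t (by omega)]
  simp only [roundF]
  split_ifs <;> (try (exfalso; omega)) <;> (congr 1 <;> omega)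

lemma loopA_rounds (k : Nat) : ∀ q c1 c2 c3 t, 3 * k ≤ q →
    runA q c1 c2 c3 t =
      runA ((q - 3 * k) + (iterRounds k c1 c2 c3).1) (iterRounds k c1 c2 c3).2.1
           (iterRounds k c1 c2 c3).2.2.1 (iterRounds k c1 c2 c3).2.2.2 (t + 3 * k) := by
  induction k with
  | zero => intro q c1 c2 c3 t h; simp [iterRounds]
  | succ k ih =>
    intro q c1 c2 c3 t h
    rw [loopA_round q c1 c2 c3 t (by omega)]
    rw [ih _ _ _ _ _ (by omega)]
    simp only [iterRounds]
    congr 1 <;> omega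

-- splitting a run of a + b rounds
lemma iterRounds_add (a : Nat) : ∀ b c1 c2 c3, iterRounds (a + b) c1 c2 c3 =
    ((iterRounds a c1 c2 c3).1 +
       (iterRounds b (iterRounds a c1 c2 c3).2.1 (iterRounds a c1 c2 c3).2.2.1 (iterRounds a c1 c2 c3).2.2.2).1,
     (iterRounds b (iterRounds a c1 c2 c3).2.1 (iterRounds a c1 c2 c3).2.2.1 (iterRounds a c1 c2 c3).2.2.2).2) := by
  induction a with
  | zero => intro b c1 c2 c3; simp [iterRounds]
  | succ a ih =>
    intro b c1 c2 c3
    rw [Nat.succ_add]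
    simp only [iterRounds]
    rw [ih]
    simp [Nat.add_assoc]

set_option maxRecDepth 200000 in
lemma iterChunk0 : iterRounds 675 0 0 0 = (1388, 0, 75, 3) := by decide

set_option maxRecDepth 200000 in
lemma iterChunk1 : iterRounds 675 0 75 3 = (1438, 0, 50, 6) := by decide

set_option maxRecDepth 200000 in
lemma iterChunk2 : iterRounds 675 0 50 6 = (1445, 0, 25, 1) := by decide

set_option maxRecDepth 200000 in
lemma iterChunk3 : iterRounds 675 0 25 1 = (1438, 0, 0, 4) := by decide

set_option maxRecDepth 200000 in
lemma iterChunk4 : iterRounds 675 0 0 4 = (1388, 0, 75, 7) := by decide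

set_option maxRecDepth 200000 in
lemma iterChunk5 : iterRounds 675 0 75 7 = (1445, 0, 50, 2) := by decide

set_option maxRecDepth 200000 in
lemma iterChunk6 : iterRounds 675 0 50 2 = (1438, 0, 25, 5) := by decide

set_option maxRecDepth 200000 in
lemma iterChunk7 : iterRounds 675 0 25 5 = (1445, 0, 0, 0) := by decide

lemma iterRounds_period : iterRounds 5400 0 0 0 = (11425, 0, 0, 0) := by
  have h : (5400 : Nat) = 675 + (675 + (675 + (675 + (675 + (675 + (675 + 675)))))) := by norm_num
  rw [h]
  rw [iterRounds_add, iterChunk0]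
  rw [iterRounds_add, iterChunk1]
  rw [iterRounds_add, iterChunk2]
  rw [iterRounds_add, iterChunk3]
  rw [iterRounds_add, iterChunk4]
  rw [iterRounds_add, iterChunk5]
  rw [iterRounds_add, iterChunk6]
  rw [iterChunk7]
  norm_num

-- one full period: 16200 plays for a net cost of 4775 quarters, counters reset
lemma loopA_period (q t : Nat) (h : 16200 ≤ q) :
    runA q 0 0 0 t = runA (q - 4775) 0 0 0 (t + 16200) := by
  have h1 := loopA_rounds 5400 q 0 0 0 t (by omega)
  rw [iterRounds_period] at h1
  norm_num at h1
  rw [show q - 4775 = q - 16200 + 11425 from by omega]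
  exact h1

set_option maxRecDepth 10000 in
lemma loopA_jump (k : Nat) : ∀ q t, 16200 + 4775 * k ≤ q →
    runA q 0 0 0 t = runA (q - 4775 * (k + 1)) 0 0 0 (t + 16200 * (k + 1)) := by
  induction k with
  | zero =>
    intro q t h
    rw [show 4775 * (0 + 1) = 4775 from by norm_num, show 16200 * (0 + 1) = 16200 from by norm_num]
    exact loopA_period q t (by omega)
  | succ k ih =>
    intro q t h
    have h1 := loopA_period q t (by omega)
    have h2 := ih (q - 4775) (t + 16200) (by omega)
    rw [show q - 4775 - 4775 * (k + 1) = q - 4775 * (k + 1 + 1) from by omega,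
        show t + 16200 + 16200 * (k + 1) = t + 16200 * (k + 1 + 1) from by ring] at h2
    rw [h1, h2]

-- ===== B-side bookkeeping =====
lemma loopB_succ (f q c1 c2 c3 m t : Nat) :
    loopB (f + 1) q c1 c2 c3 m t =
      if q = 0 then t
      else
        if m = 0 then
          (if c1 + 1 = 27 then loopB f ((q - 1) + 20) 0 c2 c3 1 (t + 1)
           else loopB f (q - 1) (c1 + 1) c2 c3 1 (t + 1))
        else if m = 1 then
          (if c2 + 1 = 100 then loopB f ((q - 1) + 50) c1 0 c3 2 (t + 1)
           else loopB f (q - 1) c1 (c2 + 1) c3 2 (t + 1))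
        else
          (if c3 + 1 = 8 then loopB f ((q - 1) + 7) c1 c2 0 0 (t + 1)
           else loopB f (q - 1) c1 c2 (c3 + 1) 0 (t + 1)) := rfl

lemma loopB_irrel (f : Nat) : ∀ f' q c1 c2 c3 m t, measQ q c1 c2 c3 < f → measQ q c1 c2 c3 < f' →
    loopB f q c1 c2 c3 m t = loopB f' q c1 c2 c3 m t := by
  induction f with
  | zero => intro f' q c1 c2 c3 m t h _; exact absurd h (Nat.not_lt_zero _)
  | succ f ih =>
    intro f' q c1 c2 c3 m t h h'
    match f' with
    | 0 => exact absurd h' (Nat.not_lt_zero _)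
    | f' + 1 =>
      rw [loopB_succ, loopB_succ]
      by_cases hq : q = 0
      · rw [if_pos hq, if_pos hq]
      · rw [if_neg hq, if_neg hq]
        simp only [measQ] at h h'
        split_ifs <;> (apply ih <;> (simp only [measQ]; omega))

lemma runB_exit (c1 c2 c3 m t : Nat) : runB 0 c1 c2 c3 m t = t := rfl

lemma runB_step0 (q c1 c2 c3 t : Nat) (hq : ¬ q = 0) :
    runB q c1 c2 c3 0 t =
      runB (if c1 + 1 = 27 then (q - 1) + 20 else q - 1) (if c1 + 1 = 27 then 0 else c1 + 1)
           c2 c3 1 (t + 1) := by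
  simp only [runB]
  rw [loopB_succ, if_neg hq]
  norm_num
  split_ifs with h1 <;>
    (apply loopB_irrel <;> (simp only [measQ, h1]; try simp [h1]) <;> omega)

lemma runB_step1 (q c1 c2 c3 t : Nat) (hq : ¬ q = 0) :
    runB q c1 c2 c3 1 t =
      runB (if c2 + 1 = 100 then (q - 1) + 50 else q - 1) c1 (if c2 + 1 = 100 then 0 else c2 + 1)
           c3 2 (t + 1) := by
  simp only [runB]
  rw [loopB_succ, if_neg hq]
  norm_num
  split_ifs with h1 <;>
    (apply loopB_irrel <;> (simp only [measQ, h1]; try simp [h1]) <;> omega)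

lemma runB_step2 (q c1 c2 c3 t : Nat) (hq : ¬ q = 0) :
    runB q c1 c2 c3 2 t =
      runB (if c3 + 1 = 8 then (q - 1) + 7 else q - 1) c1 c2 (if c3 + 1 = 8 then 0 else c3 + 1)
           0 (t + 1) := by
  simp only [runB]
  rw [loopB_succ, if_neg hq]
  norm_num
  split_ifs with h1 <;>
    (apply loopB_irrel <;> (simp only [measQ, h1]; try simp [h1]) <;> omega)

-- one iteration of A's three-machine body, expressed on B's round-robin loop
lemma loopB_round (q c1 c2 c3 t : Nat) (hq : ¬ q = 0) :
    runB q c1 c2 c3 0 t =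
      runB (let q1 := if c1 + 1 = 27 then (q - 1) + 20 else q - 1
            let q2 := if q1 = 0 then q1 else if c2 + 1 = 100 then (q1 - 1) + 50 else q1 - 1
            if q2 = 0 then q2 else if c3 + 1 = 8 then (q2 - 1) + 7 else q2 - 1)
           (if c1 + 1 = 27 then 0 else c1 + 1)
           (let q1 := if c1 + 1 = 27 then (q - 1) + 20 else q - 1
            if q1 = 0 then c2 else if c2 + 1 = 100 then 0 else c2 + 1)
           (let q1 := if c1 + 1 = 27 then (q - 1) + 20 else q - 1
            let q2 := if q1 = 0 then q1 else if c2 + 1 = 100 then (q1 - 1) + 50 else q1 - 1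
            if q2 = 0 then c3 else if c3 + 1 = 8 then 0 else c3 + 1)
           0
           (let q1 := if c1 + 1 = 27 then (q - 1) + 20 else q - 1
            let q2 := if q1 = 0 then q1 else if c2 + 1 = 100 then (q1 - 1) + 50 else q1 - 1
            let t1 := t + 1
            let t2 := if q1 = 0 then t1 else t1 + 1
            if q2 = 0 then t2 else t2 + 1) := by
  simp only []
  rw [runB_step0 q c1 c2 c3 t hq]
  by_cases hq1 : (if c1 + 1 = 27 then (q - 1) + 20 else q - 1) = 0
  · rw [hq1, runB_exit]
    simp [runB_exit]
  · rw [runB_step1 _ _ _ _ _ hq1]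
    simp only [if_neg hq1]
    by_cases hq2 : (if c2 + 1 = 100 then ((if c1 + 1 = 27 then (q - 1) + 20 else q - 1) - 1) + 50
                    else (if c1 + 1 = 27 then (q - 1) + 20 else q - 1) - 1) = 0
    · rw [hq2, runB_exit]
      simp [runB_exit]
    · rw [runB_step2 _ _ _ _ _ hq2]
      simp only [if_neg hq2]

-- B's round-robin loop started at machine 0 computes exactly A's loop
lemma loopB_eq_loopA (n : Nat) : ∀ q c1 c2 c3 t, measQ q c1 c2 c3 ≤ n →
    runB q c1 c2 c3 0 t = runA q c1 c2 c3 t := by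
  induction n with
  | zero =>
    intro q c1 c2 c3 t h
    have hq : q = 0 := by simp only [measQ] at h; omega
    subst hq
    rw [runB_exit, runA_exit]
  | succ n ih =>
    intro q c1 c2 c3 t h
    by_cases hq : q = 0
    · subst hq; rw [runB_exit, runA_exit]
    · rw [loopB_round q c1 c2 c3 t hq, runA_step q c1 c2 c3 t hq]
      simp only []
      apply ih
      have := measQ_decA q c1 c2 c3 hq
      simp only [] at this
      omega

-- ===== VERDICT (by name: the statement is the Claim_ definition above) =====
theorem calculate_plays_spec : Claim_equal_calculate_plays := by
  intro n _
  unfold Spec_calculate_plays calculate_plays calculate_plays_alt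
  simp only []
  rw [show loopA (26 * n.toNat + 1) n.toNat 0 0 0 0 = runA n.toNat 0 0 0 0 from
        loopA_irrel _ _ _ _ _ _ _ (by simp only [measQ]; omega) (by simp only [measQ]; omega)]
  by_cases h : 16200 ≤ n.toNat
  · rw [if_pos h]
    have hk : 4775 * ((n.toNat - 16200) / 4775) ≤ n.toNat - 16200 := by
      rw [Nat.mul_comm]; exact Nat.div_mul_le_self _ _
    rw [loopA_jump ((n.toNat - 16200) / 4775) n.toNat 0 (by omega)]
    rw [show loopB (26 * (n.toNat - 4775 * ((n.toNat - 16200) / 4775 + 1)) + 1)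
              (n.toNat - 4775 * ((n.toNat - 16200) / 4775 + 1)) 0 0 0 0
              (16200 * ((n.toNat - 16200) / 4775 + 1)) =
            runB (n.toNat - 4775 * ((n.toNat - 16200) / 4775 + 1)) 0 0 0 0
              (16200 * ((n.toNat - 16200) / 4775 + 1)) from
          loopB_irrel _ _ _ _ _ _ _ _ (by simp only [measQ]; omega) (by simp only [measQ]; omega)]
    rw [loopB_eq_loopA (measQ (n.toNat - 4775 * ((n.toNat - 16200) / 4775 + 1)) 0 0 0) _ _ _ _ _ (Nat.le_refl _)]
    rw [Nat.zero_add]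

  · rw [if_neg h]
    rw [show loopB (26 * (n.toNat - 4775 * 0) + 1) (n.toNat - 4775 * 0) 0 0 0 0 (16200 * 0) =
          runB (n.toNat - 4775 * 0) 0 0 0 0 (16200 * 0) from
        loopB_irrel _ _ _ _ _ _ _ _ (by simp only [measQ]; omega) (by simp only [measQ]; omega)]
    rw [loopB_eq_loopA (measQ (n.toNat - 4775 * 0) 0 0 0) _ _ _ _ _ (Nat.le_refl _)]
    norm_num
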